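-- pv_equiv track=rewrite | github.com/catkin/catkin_tools | catkin_tools/verbs/catkin_build/common.py | _extract_cmake_and_make_arguments
-- ===== SOURCE A (Python) =====
-- def _extract_cmake_and_make_arguments(args, extract_catkin_make):
--     cmake_args = []
--     make_args = []
--     catkin_make_args = []
--
--     arg_types = {
--         '--cmake-args': cmake_args,
--         '--make-args': make_args
--     }
--     if extract_catkin_make:
--         arg_types['--catkin-make-args'] = catkin_make_args
--
--     arg_indexes = {}
--     for k in arg_types.keys():
--         if k in args:
--             arg_indexes[args.index(k)] = k
--
--     def split_arguments(args, splitter_name):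
--         if splitter_name not in args:
--             return args, None
--         index = args.index(splitter_name)
--         return args[0:index], args[index + 1:]
--
--     for index in reversed(sorted(arg_indexes.keys())):
--         arg_type = arg_indexes[index]
--         args, specific_args = split_arguments(args, arg_type)
--         arg_types[arg_type].extend(specific_args)
--
--     # classify -D* and -G* arguments as cmake specific arguments
--     implicit_cmake_args = [a for a in args if a.startswith('-D') or a.startswith('-G')]
--     args = [a for a in args if a not in implicit_cmake_args]
--
--     return args, implicit_cmake_args + cmake_args, make_args, catkin_make_args
-- ===== SOURCE B (Python) =====
-- def _extract_cmake_and_make_arguments(args, extract_catkin_make):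
--     buckets = {'--cmake-args': [], '--make-args': []}
--     if extract_catkin_make:
--         buckets['--catkin-make-args'] = []
--     main = []
--     current = main
--     used = set()
--     for a in args:
--         if a in buckets and a not in used:
--             used.add(a)
--             current = buckets[a]
--         else:
--             current.append(a)
--     is_cmake = lambda a: a.startswith('-D') or a.startswith('-G')
--     implicit = [a for a in main if is_cmake(a)]
--     rest = [a for a in main if not is_cmake(a)]
--     return (rest, implicit + buckets['--cmake-args'], buckets['--make-args'],
--             buckets.get('--catkin-make-args', []))
-- ===== Notes on version B (the rewrite author's own statement) =====
-- stated objective: simpler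
-- what changed: Replaces A's find-index/sort/repeated-list-splitting machinery by a single left-to-right pass that switches the current bucket at the first occurrence of each splitter token (tracked with a seen-set).
import Mathlib
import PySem

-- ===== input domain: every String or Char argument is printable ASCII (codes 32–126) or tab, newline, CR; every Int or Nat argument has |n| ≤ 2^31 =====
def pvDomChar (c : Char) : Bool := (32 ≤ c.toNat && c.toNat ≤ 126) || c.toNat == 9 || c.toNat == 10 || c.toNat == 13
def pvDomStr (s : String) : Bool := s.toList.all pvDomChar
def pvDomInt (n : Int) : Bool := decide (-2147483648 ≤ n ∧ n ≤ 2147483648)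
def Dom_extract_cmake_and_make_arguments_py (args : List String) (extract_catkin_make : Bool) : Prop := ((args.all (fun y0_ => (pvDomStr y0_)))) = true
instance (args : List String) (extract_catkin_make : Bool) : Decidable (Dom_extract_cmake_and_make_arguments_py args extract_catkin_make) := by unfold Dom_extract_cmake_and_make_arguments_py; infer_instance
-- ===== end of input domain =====

-- B replaces A's find-index/sort/repeated-splitting machinery by one left-to-right pass with a
-- current bucket and a seen-set; objective: simpler.

-- ===== PORT A =====
-- keys of the arg_types dict, in insertion order
def pvArgTypeKeys (ecm : Bool) : List String :=
  ["--cmake-args", "--make-args"] ++ (if ecm then ["--catkin-make-args"] else [])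

-- arg_indexes = {}; for k in arg_types.keys(): if k in args: arg_indexes[args.index(k)] = k
-- ('k in args' ↔ index? is some; args.index(k) is that index)
def pvArgIndexes (args : List String) (ecm : Bool) : PySem.Dict Nat String :=
  (pvArgTypeKeys ecm).foldl (fun d k =>
    match PySem.List.index? args k with
    | some i => d.insert i k
    | none => d) PySem.Dict.empty

-- one iteration of 'for index in reversed(sorted(arg_indexes.keys())): …'
-- (split_arguments inlined; the 'none' branch is unreachable for the indexes A feeds it,
-- since arg_indexes records only present splitters: Python would raise on extend(None))
def pvAStep (d : PySem.Dict Nat String)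
    (st : List String × List String × List String × List String) (index : Nat) :
    List String × List String × List String × List String :=
  let argType := d.getD index ""
  let (args0, c, m, ck) := st
  match PySem.List.index? args0 argType with
  | none => (args0, c, m, ck)
  | some i =>
    let newArgs := PySem.List.slice args0 (some 0) (some (i : Int))
    let spec := PySem.List.slice args0 (some ((i : Int) + 1)) none
    if argType == "--cmake-args" then (newArgs, c ++ spec, m, ck)
    else if argType == "--make-args" then (newArgs, c, m ++ spec, ck)
    else (newArgs, c, m, ck ++ spec)

def extract_cmake_and_make_arguments_py (args : List String) (extract_catkin_make : Bool) :
    List String × List String × List String × List String :=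
  let argIndexes := pvArgIndexes args extract_catkin_make
  let order := (PySem.List.sorted argIndexes.keys (fun x => x) false).reverse
  let st := order.foldl (pvAStep argIndexes) (args, [], [], [])
  let args2 := st.1
  let cmake_args := st.2.1
  let make_args := st.2.2.1
  let catkin_make_args := st.2.2.2
  let implicit := args2.filter (fun a => PySem.Str.startswith a "-D" || PySem.Str.startswith a "-G")
  let rest := args2.filter (fun a => !(implicit.contains a))
  (rest, implicit ++ cmake_args, make_args, catkin_make_args)

-- ===== PORT B =====
structure PvSt where
  main : List String
  cmake : List String
  make : List String
  catkin : List String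
  cur : Nat          -- which list 'current' aliases: 0 main, 1 cmake, 2 make, 3 catkin
  used : List String -- PySem.Set of splitter names already used
deriving Repr, DecidableEq

def pvIsSplitter (ecm : Bool) (a : String) : Bool :=
  a == "--cmake-args" || a == "--make-args" || (ecm && a == "--catkin-make-args")

def pvCurOf (a : String) : Nat :=
  if a == "--cmake-args" then 1 else if a == "--make-args" then 2 else 3

def pvAppend (st : PvSt) (a : String) : PvSt :=
  match st.cur with
  | 0 => { st with main := st.main ++ [a] }
  | 1 => { st with cmake := st.cmake ++ [a] }
  | 2 => { st with make := st.make ++ [a] }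
  | _ => { st with catkin := st.catkin ++ [a] }

def pvStep (ecm : Bool) (st : PvSt) (a : String) : PvSt :=
  if pvIsSplitter ecm a && !(PySem.Set.contains st.used a) then
    { st with used := PySem.Set.add st.used a, cur := pvCurOf a }
  else pvAppend st a

def pvInit : PvSt := ⟨[], [], [], [], 0, PySem.Set.empty⟩

def pvIsCMakeArg (a : String) : Bool :=
  PySem.Str.startswith a "-D" || PySem.Str.startswith a "-G"

def extract_cmake_and_make_arguments_py_alt (args : List String) (extract_catkin_make : Bool) :
    List String × List String × List String × List String :=
  let st := args.foldl (pvStep extract_catkin_make) pvInit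
  let implicit := st.main.filter pvIsCMakeArg
  let rest := st.main.filter (fun a => !(pvIsCMakeArg a))
  (rest, implicit ++ st.cmake, st.make, if extract_catkin_make then st.catkin else [])

-- ===== PRECONDITION & SPEC =====
def Spec_extract_cmake_and_make_arguments_py (args : List String) (extract_catkin_make : Bool) (out : List String × List String × List String × List String) : Prop := out = extract_cmake_and_make_arguments_py_alt args extract_catkin_make
instance (args : List String) (extract_catkin_make : Bool) (out : List String × List String × List String × List String) : Decidable (Spec_extract_cmake_and_make_arguments_py args extract_catkin_make out) := by unfold Spec_extract_cmake_and_make_arguments_py; infer_instance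

-- ===== CLAIM (what is proved, stated in full; the proofs are below) =====
def Claim_equal_extract_cmake_and_make_arguments_py : Prop := ∀ (args : List String) (extract_catkin_make : Bool), Dom_extract_cmake_and_make_arguments_py args extract_catkin_make → Spec_extract_cmake_and_make_arguments_py args extract_catkin_make (extract_cmake_and_make_arguments_py args extract_catkin_make)

-- ===== LEMMAS AND PROOFS =====

-- -------- generic list/index? helpers --------

theorem pv_index?_take {α : Type} [BEq α] [LawfulBEq α] (xs : List α) (n : Nat) (v : α) :
    PySem.List.index? (xs.take n) v
      = (PySem.List.index? xs v).bind (fun i => if i < n then some i else none) := by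
  cases h : PySem.List.index? xs v with
  | none =>
    have hv : v ∉ xs := (PySem.List.index?_eq_none_iff xs v).1 h
    have hvt : v ∉ xs.take n := fun hm => hv (List.mem_of_mem_take hm)
    rw [(PySem.List.index?_eq_none_iff _ v).2 hvt]
    rfl
  | some i =>
    obtain ⟨pre, suf, hxs, hlen, hvpre⟩ := (PySem.List.index?_eq_some_iff xs v i).1 h
    by_cases hin : i < n
    · have htake : xs.take n = pre ++ v :: suf.take (n - i - 1) := by
        subst hxs
        rw [List.take_append]
        congr 1
        · exact List.take_of_length_le (by omega)
        · have : n - pre.length = (n - i - 1) + 1 := by omega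
          rw [this, List.take_succ_cons]
      rw [htake]
      simp only [Option.bind_some, if_pos hin]
      exact (PySem.List.index?_eq_some_iff _ v i).2 ⟨pre, suf.take (n - i - 1), rfl, hlen, hvpre⟩
    · have htake : xs.take n = pre.take n := by
        subst hxs; rw [List.take_append]
        have : n - pre.length = 0 := by omega
        simp [this]
      have hvt : v ∉ xs.take n := by
        rw [htake]; intro hm; exact hvpre (List.mem_of_mem_take hm)
      rw [(PySem.List.index?_eq_none_iff _ v).2 hvt]
      simp [hin]

theorem pv_filter_not_mem_filter (l : List String) (p : String → Bool) :
    l.filter (fun a => !((l.filter p).contains a)) = l.filter (fun a => !(p a)) := by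
  apply List.filter_congr
  intro a ha
  have : (l.filter p).contains a = p a := by
    cases hp : p a
    · simp [List.mem_filter, hp]
    · simp [List.mem_filter, ha, hp]
  rw [this]

-- sorted-descending head = the maximum, tail = sorted of the rest
theorem pv_sort_desc (L : List Nat) (hnd : L.Nodup) (hne : L ≠ []) :
    ∃ im, im ∈ L ∧ (∀ j ∈ L, j ≤ im) ∧
      (PySem.List.sorted L (fun x => x) false).reverse
        = im :: (PySem.List.sorted (L.filter (fun j => !(j == im))) (fun x => x) false).reverse := by
  set s := PySem.List.sorted L (fun x => x) false with hs
  have hperm : s.Perm L := PySem.List.sorted_perm L (fun x => x) false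
  have hsnd : s.Nodup := (hperm.nodup_iff).2 hnd
  have hle : s.Pairwise (fun a b => (fun x => x) a ≤ (fun x => x) b) :=
    PySem.List.sorted_pairwise L (fun x => x)
  have hlt : s.Pairwise (fun a b : Nat => a < b) := by
    have := List.Pairwise.and hle hsnd
    exact this.imp (fun h => lt_of_le_of_ne h.1 h.2)
  have hsne : s ≠ [] := by
    intro h; exact hne ((PySem.List.sorted_eq_nil_iff L (fun x => x) false).1 h)
  set im := s.getLast hsne with him
  have hsplit : s = s.dropLast ++ [im] := (List.dropLast_append_getLast hsne).symm
  have himmem : im ∈ L := hperm.mem_iff.1 (List.getLast_mem hsne)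
  have hmaxdl : ∀ x ∈ s.dropLast, x ≤ im := by
    intro x hx
    have hp := hlt
    rw [hsplit] at hp
    have := (List.pairwise_append.1 hp).2.2
    exact le_of_lt (this x hx im (List.mem_singleton_self im))
  have hmax : ∀ j ∈ L, j ≤ im := by
    intro j hj
    have : j ∈ s := hperm.mem_iff.2 hj
    rw [hsplit] at this
    rcases List.mem_append.1 this with h | h
    · exact hmaxdl j h
    · simp at h; omega
  have himnotdl : im ∉ s.dropLast := by
    intro hm
    have := hsnd
    rw [hsplit] at this
    exact (List.disjoint_of_nodup_append this) hm (List.mem_singleton_self im)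
  have hfilter_dl : s.dropLast.filter (fun j => !(j == im)) = s.dropLast := by
    apply List.filter_eq_self.2
    intro x hx
    simp only [Bool.not_eq_eq_eq_not, Bool.not_true, beq_eq_false_iff_ne]
    intro h; exact himnotdl (h ▸ hx)
  have hpermL : s.dropLast.Perm (L.filter (fun j => !(j == im))) := by
    have h1 : (s.filter (fun j => !(j == im))).Perm (L.filter (fun j => !(j == im))) :=
      hperm.filter _
    have h2 : s.filter (fun j => !(j == im)) = s.dropLast := by
      conv_lhs => rw [hsplit]
      rw [List.filter_append, hfilter_dl]
      simp
    rwa [h2] at h1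
  have hsorted' : PySem.List.sorted (L.filter (fun j => !(j == im))) (fun x => x) false
      = s.dropLast := by
    apply PySem.List.sorted_eq_of_perm_of_pairwise_lt
    · exact hpermL
    · exact hlt.sublist (List.dropLast_sublist s)
  refine ⟨im, himmem, hmax, ?_⟩
  rw [hsorted']
  conv_lhs => rw [hsplit]
  simp

-- -------- characterization of pvArgIndexes --------

def pvIG (args : List String) (k : String) : Nat := (PySem.List.index? args k).getD 0

def pvFK (args : List String) (ecm : Bool) : List String :=
  (pvArgTypeKeys ecm).filter (fun k => (PySem.List.index? args k).isSome)

theorem pv_keys_nodup (ecm : Bool) : (pvArgTypeKeys ecm).Nodup := by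
  cases ecm <;> decide

theorem pvFK_nodup (args : List String) (ecm : Bool) : (pvFK args ecm).Nodup :=
  (pv_keys_nodup ecm).filter _

theorem pvIG_inj (args : List String) (a b : String)
    (ha : (PySem.List.index? args a).isSome) (hb : (PySem.List.index? args b).isSome)
    (h : pvIG args a = pvIG args b) : a = b := by
  obtain ⟨i, hi⟩ := Option.isSome_iff_exists.1 ha
  obtain ⟨j, hj⟩ := Option.isSome_iff_exists.1 hb
  obtain ⟨hik, hia, _⟩ := PySem.List.getElem_of_index?_eq_some hi
  obtain ⟨hjk, hjb, _⟩ := PySem.List.getElem_of_index?_eq_some hj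
  have hij : i = j := by rw [pvIG, pvIG, hi, hj] at h; exact h
  subst hij
  rw [← hia, ← hjb]

theorem pvArgIndexes_eq_aux (args : List String) (keys : List String)
    (d : PySem.Dict Nat String) :
    keys.foldl (fun d k =>
        match PySem.List.index? args k with
        | some i => d.insert i k
        | none => d) d
      = (keys.filter (fun k => (PySem.List.index? args k).isSome)).foldl
          (fun d k => d.insert (pvIG args k) k) d := by
  induction keys generalizing d with
  | nil => rfl
  | cons k rest ih =>
    rw [List.foldl_cons, List.filter_cons]
    cases h : PySem.List.index? args k with
    | none =>
      simp only [Option.isSome_none, Bool.false_eq_true, if_false]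
      exact ih d
    | some i =>
      simp only [h, Option.isSome_some, if_true, List.foldl_cons, pvIG, Option.getD_some]
      exact ih _

theorem pvArgIndexes_items (args : List String) (ecm : Bool) :
    (pvArgIndexes args ecm).items = (pvFK args ecm).map (fun k => (pvIG args k, k)) := by
  unfold pvArgIndexes
  rw [pvArgIndexes_eq_aux]
  have h := PySem.Dict.items_foldl_insert_fresh (l := pvFK args ecm)
      (k := pvIG args) (v := fun k => k) (d := PySem.Dict.empty)
      (by intro a _; exact PySem.Dict.contains_empty _)
      (by
        apply (pvFK_nodup args ecm).map_on
        intro a ha b hb hab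
        exact pvIG_inj args a b (List.mem_filter.1 ha).2 (List.mem_filter.1 hb).2 hab)
  simpa [pvFK] using h

theorem pvArgIndexes_keys (args : List String) (ecm : Bool) :
    (pvArgIndexes args ecm).keys = (pvFK args ecm).map (pvIG args) := by
  simp only [PySem.Dict.keys, pvArgIndexes_items, List.map_map]
  rfl

theorem pvArgIndexes_keys_nodup (args : List String) (ecm : Bool) :
    (pvArgIndexes args ecm).keys.Nodup := by
  rw [pvArgIndexes_keys]
  apply (pvFK_nodup args ecm).map_on
  intro a ha b hb hab
  exact pvIG_inj args a b (List.mem_filter.1 ha).2 (List.mem_filter.1 hb).2 hab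

theorem pv_splitter_iff (ecm : Bool) (a : String) :
    pvIsSplitter ecm a = true ↔ a ∈ pvArgTypeKeys ecm := by
  cases ecm <;> simp [pvIsSplitter, pvArgTypeKeys] <;> tauto

-- -------- B-side fold lemmas --------

def pvBucket (st : PvSt) (t : Nat) : List String :=
  match t with
  | 1 => st.cmake
  | 2 => st.make
  | _ => st.catkin

theorem pvAppend_used (st : PvSt) (a : String) : (pvAppend st a).used = st.used := by
  unfold pvAppend; rcases st with ⟨mn, c, m, ck, cur, u⟩
  rcases cur with _ | _ | _ | cur <;> rfl

theorem pvAppend_cur (st : PvSt) (a : String) : (pvAppend st a).cur = st.cur := by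
  unfold pvAppend; rcases st with ⟨mn, c, m, ck, cur, u⟩
  rcases cur with _ | _ | _ | cur <;> rfl

theorem pv_used_foldl (ecm : Bool) (l : List String) (st : PvSt) (a : String) :
    a ∈ (l.foldl (pvStep ecm) st).used
      ↔ a ∈ st.used ∨ (pvIsSplitter ecm a = true ∧ a ∈ l) := by
  induction l generalizing st with
  | nil => simp
  | cons b rest ih =>
    simp only [List.foldl_cons]
    by_cases hsb : pvIsSplitter ecm b = true
    · by_cases hcb : PySem.Set.contains st.used b = true
      · have hstep : pvStep ecm st b = pvAppend st b := by
          rw [pvStep, hsb, hcb]; rfl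
        rw [hstep, ih, pvAppend_used]
        have hbu : b ∈ st.used := (PySem.Set.contains_iff st.used b).1 hcb
        constructor
        · rintro (h | ⟨hs, hm⟩)
          · exact Or.inl h
          · exact Or.inr ⟨hs, List.mem_cons_of_mem _ hm⟩
        · rintro (h | ⟨hs, hm⟩)
          · exact Or.inl h
          · rcases List.mem_cons.1 hm with rfl | h
            · exact Or.inl hbu
            · exact Or.inr ⟨hs, h⟩
      · have hcb' : PySem.Set.contains st.used b = false := by
          cases h : PySem.Set.contains st.used b
          · rfl
          · exact absurd h hcb
        have hstep : pvStep ecm st b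
            = { st with used := PySem.Set.add st.used b, cur := pvCurOf b } := by
          rw [pvStep, hsb, hcb']; rfl
        rw [hstep, ih]
        simp only [PySem.Set.mem_add]
        constructor
        · rintro (⟨h | h⟩ | ⟨hs, hm⟩)
          · exact Or.inl h
          · subst h; exact Or.inr ⟨hsb, List.mem_cons_self⟩
          · exact Or.inr ⟨hs, List.mem_cons_of_mem _ hm⟩
        · rintro (h | ⟨hs, hm⟩)
          · exact Or.inl (Or.inl h)
          · rcases List.mem_cons.1 hm with rfl | h
            · exact Or.inl (Or.inr rfl)
            · exact Or.inr ⟨hs, h⟩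
    · have hsb' : pvIsSplitter ecm b = false := by
        cases h : pvIsSplitter ecm b
        · rfl
        · exact absurd h hsb
      have hstep : pvStep ecm st b = pvAppend st b := by
        rw [pvStep, hsb']; rfl
      rw [hstep, ih, pvAppend_used]
      constructor
      · rintro (h | ⟨hs, hm⟩)
        · exact Or.inl h
        · exact Or.inr ⟨hs, List.mem_cons_of_mem _ hm⟩
      · rintro (h | ⟨hs, hm⟩)
        · exact Or.inl h
        · rcases List.mem_cons.1 hm with rfl | h
          · exact absurd hs hsb
          · exact Or.inr ⟨hs, h⟩

theorem pv_foldl_data (ecm : Bool) (l : List String) (st : PvSt)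
    (h : ∀ a ∈ l, pvIsSplitter ecm a = true → a ∈ st.used) :
    l.foldl (pvStep ecm) st = l.foldl pvAppend st := by
  induction l generalizing st with
  | nil => rfl
  | cons b rest ih =>
    have hstep : pvStep ecm st b = pvAppend st b := by
      by_cases hs : pvIsSplitter ecm b = true
      · have hc : PySem.Set.contains st.used b = true :=
          (PySem.Set.contains_iff st.used b).2 (h b List.mem_cons_self hs)
        rw [pvStep, hs, hc]; rfl
      · have hs' : pvIsSplitter ecm b = false := by
          cases hx : pvIsSplitter ecm b
          · rfl
          · exact absurd hx hs
        rw [pvStep, hs']; rfl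
    simp only [List.foldl_cons, hstep]
    apply ih
    intro a ha hs
    rw [pvAppend_used]
    exact h a (List.mem_cons_of_mem _ ha) hs

theorem pv_foldl_pvAppend_main (l : List String) (st : PvSt) (h : st.cur = 0) :
    l.foldl pvAppend st = { st with main := st.main ++ l } := by
  induction l generalizing st with
  | nil => simp
  | cons b rest ih =>
    rcases st with ⟨mn, c, m, ck, cur, u⟩
    simp only at h; subst h
    simp only [List.foldl_cons, pvAppend]
    rw [ih _ rfl]
    simp

theorem pv_foldl_pvAppend_cmake (l : List String) (st : PvSt) (h : st.cur = 1) :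
    l.foldl pvAppend st = { st with cmake := st.cmake ++ l } := by
  induction l generalizing st with
  | nil => simp
  | cons b rest ih =>
    rcases st with ⟨mn, c, m, ck, cur, u⟩
    simp only at h; subst h
    simp only [List.foldl_cons, pvAppend]
    rw [ih _ rfl]
    simp

theorem pv_foldl_pvAppend_make (l : List String) (st : PvSt) (h : st.cur = 2) :
    l.foldl pvAppend st = { st with make := st.make ++ l } := by
  induction l generalizing st with
  | nil => simp
  | cons b rest ih =>
    rcases st with ⟨mn, c, m, ck, cur, u⟩
    simp only at h; subst h
    simp only [List.foldl_cons, pvAppend]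
    rw [ih _ rfl]
    simp

theorem pv_foldl_pvAppend_catkin (l : List String) (st : PvSt) (h : st.cur = 3) :
    l.foldl pvAppend st = { st with catkin := st.catkin ++ l } := by
  induction l generalizing st with
  | nil => simp
  | cons b rest ih =>
    rcases st with ⟨mn, c, m, ck, cur, u⟩
    simp only at h; subst h
    simp only [List.foldl_cons, pvAppend]
    rw [ih _ rfl]
    simp

theorem pvCurOf_mem (a : String) : pvCurOf a = 1 ∨ pvCurOf a = 2 ∨ pvCurOf a = 3 := by
  unfold pvCurOf; split_ifs <;> simp

theorem pv_splitter_cases (ecm : Bool) (a : String) (ha : pvIsSplitter ecm a = true) :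
    a = "--cmake-args" ∨ a = "--make-args" ∨ a = "--catkin-make-args" := by
  simp [pvIsSplitter] at ha
  tauto

theorem pvCurOf_inj (ecm : Bool) (a b : String) (ha : pvIsSplitter ecm a = true)
    (hb : pvIsSplitter ecm b = true) (h : pvCurOf a = pvCurOf b) : a = b := by
  rcases pv_splitter_cases ecm a ha with rfl | rfl | rfl <;>
    rcases pv_splitter_cases ecm b hb with rfl | rfl | rfl <;>
    first
      | rfl
      | (exfalso; revert h; decide)

theorem pvBucket_switch (st : PvSt) (u : List String) (c t : Nat) :
    pvBucket { st with used := u, cur := c } t = pvBucket st t := by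
  rcases t with _ | _ | _ | t <;> rfl

theorem pvBucket_pvAppend (st : PvSt) (a : String) (t : Nat)
    (hcur : st.cur ≠ t) (hc3 : st.cur ≤ 3) (ht : t = 1 ∨ t = 2 ∨ t = 3) :
    pvBucket (pvAppend st a) t = pvBucket st t := by
  rcases st with ⟨mn, c, m, ck, cur, u⟩
  simp only at hcur hc3
  rcases ht with rfl | rfl | rfl <;>
    rcases cur with _ | _ | _ | cur <;> simp_all [pvAppend, pvBucket] <;> omega

theorem pv_bucket_keeps (ecm : Bool) (k : String) (hk : pvIsSplitter ecm k = true) :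
    ∀ (l : List String) (st : PvSt), k ∉ l → st.cur ≤ 3 → st.cur ≠ pvCurOf k →
      pvBucket st (pvCurOf k) = [] →
      ((l.foldl (pvStep ecm) st).cur ≤ 3 ∧
       (l.foldl (pvStep ecm) st).cur ≠ pvCurOf k ∧
       pvBucket (l.foldl (pvStep ecm) st) (pvCurOf k) = []) := by
  intro l
  induction l with
  | nil => intro st _ h1 h2 h3; exact ⟨h1, h2, h3⟩
  | cons b rest ih =>
    intro st hkl h1 h2 h3
    have hkb : k ≠ b := fun h => hkl (h ▸ List.mem_cons_self)
    have hkrest : k ∉ rest := fun h => hkl (List.mem_cons_of_mem _ h)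
    simp only [List.foldl_cons]
    by_cases hb : (pvIsSplitter ecm b && !(PySem.Set.contains st.used b)) = true
    · have hb1 : pvIsSplitter ecm b = true := by
        have := hb; rw [Bool.and_eq_true] at this; exact this.1
      rw [pvStep, if_pos hb]
      apply ih _ hkrest
      · have := pvCurOf_mem b; simp only []; omega
      · simp only []
        intro h
        exact hkb (pvCurOf_inj ecm k b hk hb1 h.symm)
      · rw [pvBucket_switch]; exact h3
    · rw [pvStep, if_neg hb]
      apply ih _ hkrest
      · rw [pvAppend_cur]; exact h1
      · rw [pvAppend_cur]; exact h2
      · rw [pvBucket_pvAppend st b (pvCurOf k) h2 h1 (pvCurOf_mem k)]; exact h3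

-- -------- A-side fold lemmas --------

theorem pv_afold_congr (d d' : PySem.Dict Nat String) (order : List Nat)
    (h : ∀ i ∈ order, d.getD i "" = d'.getD i "") :
    ∀ st, order.foldl (pvAStep d) st = order.foldl (pvAStep d') st := by
  induction order with
  | nil => intro st; rfl
  | cons i rest ih =>
    intro st
    have hstep : pvAStep d st i = pvAStep d' st i := by
      unfold pvAStep
      rw [h i (List.mem_cons_self)]
    simp only [List.foldl_cons, hstep]
    exact ih (fun j hj => h j (List.mem_cons_of_mem _ hj)) _

theorem pv_afold_shift (d : PySem.Dict Nat String) (c m ck : List String) :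
    ∀ (order : List Nat) (a c' m' ck' : List String),
      order.foldl (pvAStep d) (a, c ++ c', m ++ m', ck ++ ck')
        = ((order.foldl (pvAStep d) (a, c', m', ck')).1,
           c ++ (order.foldl (pvAStep d) (a, c', m', ck')).2.1,
           m ++ (order.foldl (pvAStep d) (a, c', m', ck')).2.2.1,
           ck ++ (order.foldl (pvAStep d) (a, c', m', ck')).2.2.2) := by
  intro order
  induction order with
  | nil => intro a c' m' ck'; rfl
  | cons i rest ih =>
    intro a c' m' ck'
    simp only [List.foldl_cons]
    cases h : PySem.List.index? a (d.getD i "") with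
    | none =>
      have e1 : pvAStep d (a, c ++ c', m ++ m', ck ++ ck') i = (a, c ++ c', m ++ m', ck ++ ck') := by
        simp only [pvAStep, h]
      have e2 : pvAStep d (a, c', m', ck') i = (a, c', m', ck') := by
        simp only [pvAStep, h]
      rw [e1, e2]
      exact ih a c' m' ck'
    | some j =>
      by_cases h1 : (d.getD i "" == "--cmake-args") = true
      · have e1 : pvAStep d (a, c ++ c', m ++ m', ck ++ ck') i
            = (PySem.List.slice a (some 0) (some (j : Int)),
               c ++ (c' ++ PySem.List.slice a (some ((j : Int) + 1)) none), m ++ m', ck ++ ck') := by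
          simp only [pvAStep, h, h1, if_true, List.append_assoc]
        have e2 : pvAStep d (a, c', m', ck') i
            = (PySem.List.slice a (some 0) (some (j : Int)),
               c' ++ PySem.List.slice a (some ((j : Int) + 1)) none, m', ck') := by
          simp only [pvAStep, h, h1, if_true]
        rw [e1, e2]
        exact ih _ _ _ _
      · by_cases h2 : (d.getD i "" == "--make-args") = true
        · have e1 : pvAStep d (a, c ++ c', m ++ m', ck ++ ck') i
              = (PySem.List.slice a (some 0) (some (j : Int)),
                 c ++ c', m ++ (m' ++ PySem.List.slice a (some ((j : Int) + 1)) none), ck ++ ck') := by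
            simp only [pvAStep, h]
            rw [if_neg h1, if_pos h2]
            simp only [List.append_assoc]
          have e2 : pvAStep d (a, c', m', ck') i
              = (PySem.List.slice a (some 0) (some (j : Int)),
                 c', m' ++ PySem.List.slice a (some ((j : Int) + 1)) none, ck') := by
            simp only [pvAStep, h]
            rw [if_neg h1, if_pos h2]
          rw [e1, e2]
          exact ih _ _ _ _
        · have e1 : pvAStep d (a, c ++ c', m ++ m', ck ++ ck') i
              = (PySem.List.slice a (some 0) (some (j : Int)),
                 c ++ c', m ++ m', ck ++ (ck' ++ PySem.List.slice a (some ((j : Int) + 1)) none)) := by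
            simp only [pvAStep, h]
            rw [if_neg h1, if_neg h2]
            simp only [List.append_assoc]
          have e2 : pvAStep d (a, c', m', ck') i
              = (PySem.List.slice a (some 0) (some (j : Int)),
                 c', m', ck' ++ PySem.List.slice a (some ((j : Int) + 1)) none) := by
            simp only [pvAStep, h]
            rw [if_neg h1, if_neg h2]
          rw [e1, e2]
          exact ih _ _ _ _

-- -------- the core equivalence, by strong induction on the argument list --------

theorem pv_core (ecm : Bool) : ∀ (n : Nat) (args : List String), args.length ≤ n →
    ((PySem.List.sorted (pvArgIndexes args ecm).keys (fun x => x) false).reverse).foldl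
      (pvAStep (pvArgIndexes args ecm)) (args, ([], [], []))
    = ((args.foldl (pvStep ecm) pvInit).main,
       (args.foldl (pvStep ecm) pvInit).cmake,
       (args.foldl (pvStep ecm) pvInit).make,
       if ecm then (args.foldl (pvStep ecm) pvInit).catkin else []) := by
  intro n
  induction n with
  | zero =>
    intro args hlen
    have hnil : args = [] := List.eq_nil_of_length_eq_zero (Nat.le_zero.1 hlen)
    subst hnil
    cases ecm <;> rfl
  | succ n ih =>
    intro args hlen
    by_cases hfl : pvFK args ecm = []
    · -- no splitter occurs in args
      have hitems : (pvArgIndexes args ecm).items = [] := by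
        rw [pvArgIndexes_items, hfl]; rfl
      have hkeys : (pvArgIndexes args ecm).keys = [] := by
        simp only [PySem.Dict.keys, hitems]; rfl
      rw [hkeys]
      have hsort : PySem.List.sorted ([] : List Nat) (fun x => x) false = [] := rfl
      rw [hsort]
      simp only [List.reverse_nil, List.foldl_nil]
      have hnos : ∀ a ∈ args, pvIsSplitter ecm a = false := by
        intro a ha
        cases hx : pvIsSplitter ecm a
        · rfl
        · exfalso
          have hmem : a ∈ pvArgTypeKeys ecm := (pv_splitter_iff ecm a).1 hx
          have hsome : (PySem.List.index? args a).isSome := by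
            rw [PySem.List.index?_isSome_iff]; exact ha
          have hin : a ∈ pvFK args ecm := List.mem_filter.2 ⟨hmem, hsome⟩
          rw [hfl] at hin
          exact List.not_mem_nil hin
      rw [pv_foldl_data ecm args pvInit (by intro a ha hs; rw [hnos a ha] at hs; cases hs)]
      rw [pv_foldl_pvAppend_main args pvInit rfl]
      simp [pvInit]
    · -- at least one splitter occurs
      have hkeysc : (pvArgIndexes args ecm).keys = (pvFK args ecm).map (pvIG args) :=
        pvArgIndexes_keys args ecm
      have hknd : (pvArgIndexes args ecm).keys.Nodup := pvArgIndexes_keys_nodup args ecm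
      have hkne : (pvArgIndexes args ecm).keys ≠ [] := by
        intro h; rw [hkeysc] at h; exact hfl (List.map_eq_nil_iff.1 h)
      obtain ⟨im, himem, hmax, horder⟩ :=
        pv_sort_desc (pvArgIndexes args ecm).keys hknd hkne
      rw [hkeysc] at himem
      obtain ⟨km, hkmfl, hkmig⟩ := List.mem_map.1 himem
      have hkmsome : (PySem.List.index? args km).isSome = true := (List.mem_filter.1 hkmfl).2
      have hkmidx : PySem.List.index? args km = some im := by
        obtain ⟨j, hj⟩ := Option.isSome_iff_exists.1 hkmsome
        rw [pvIG, hj] at hkmig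
        simp only [Option.getD_some] at hkmig
        rw [hj, hkmig]
      obtain ⟨pre, suf, hsplit, hlenpre, hnotpre⟩ :=
        (PySem.List.index?_eq_some_iff args km im).1 hkmidx
      have hpre_take : args.take im = pre := by
        rw [hsplit, ← hlenpre, List.take_append]
        simp
      have him_lt : im < args.length := by
        rw [hsplit, ← hlenpre]; simp
      have hdrop : args.drop (im + 1) = suf := by
        have h2 : args = (pre ++ [km]) ++ suf := by rw [hsplit]; simp
        have h3 : (pre ++ [km]).length = im + 1 := by simp [hlenpre]
        rw [h2, ← h3]
        exact List.drop_left
      have hmax' : ∀ k, (PySem.List.index? args k).isSome = true → k ∈ pvArgTypeKeys ecm →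
          pvIG args k ≤ im := by
        intro k hks hkm
        apply hmax
        rw [hkeysc]
        exact List.mem_map.2 ⟨k, List.mem_filter.2 ⟨hkm, hks⟩, rfl⟩
      have hmemitem : (im, km) ∈ (pvArgIndexes args ecm).items := by
        rw [pvArgIndexes_items]
        exact List.mem_map.2 ⟨km, hkmfl, by rw [hkmig]⟩
      have hgetD : (pvArgIndexes args ecm).getD im "" = km :=
        PySem.Dict.getD_of_mem_items _ hmemitem hknd ""
      have hidxpre : ∀ k, PySem.List.index? pre k
          = (PySem.List.index? args k).bind (fun i => if i < im then some i else none) := by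
        intro k; rw [← hpre_take]; exact pv_index?_take args im k
      have hfk_pre : pvFK pre ecm = (pvFK args ecm).filter (fun k => !(pvIG args k == im)) := by
        unfold pvFK
        rw [List.filter_filter]
        apply List.filter_congr
        intro k hk
        rw [hidxpre k]
        cases hx : PySem.List.index? args k with
        | none => simp
        | some i =>
          have hig : pvIG args k = i := by rw [pvIG, hx]; rfl
          have hle : i ≤ im := hig ▸ hmax' k (by rw [hx]; rfl) hk
          rw [hig]
          by_cases hii : i = im
          · subst hii; simp
          · have hlt : i < im := lt_of_le_of_ne hle hii
            simp [hlt, hii]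
      have hig_pre : ∀ k ∈ pvFK pre ecm, pvIG pre k = pvIG args k := by
        intro k hkp
        have hks : (PySem.List.index? pre k).isSome := (List.mem_filter.1 hkp).2
        rw [pvIG, pvIG, hidxpre k]
        cases hx : PySem.List.index? args k with
        | none => rw [hidxpre k, hx] at hks; simp at hks
        | some i =>
          rw [hidxpre k, hx] at hks
          by_cases hlt : i < im
          · simp [hlt]
          · simp [hlt] at hks
      have hitems_pre : (pvArgIndexes pre ecm).items
          = (pvArgIndexes args ecm).items.filter (fun e => !(e.1 == im)) := by
        have hL : (pvFK pre ecm).map (fun k => (pvIG pre k, k))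
            = ((pvFK args ecm).filter (fun k => !(pvIG args k == im))).map
                (fun k => (pvIG args k, k)) := by
          rw [← hfk_pre]
          exact List.map_congr_left (fun k hk => by rw [hig_pre k hk])
        rw [pvArgIndexes_items, pvArgIndexes_items, hL, List.filter_map]
        rfl
      have hknd_pre : (pvArgIndexes pre ecm).keys.Nodup := pvArgIndexes_keys_nodup pre ecm
      have hkeys_pre : (pvArgIndexes pre ecm).keys
          = (pvArgIndexes args ecm).keys.filter (fun j => !(j == im)) := by
        simp only [PySem.Dict.keys]
        rw [hitems_pre, List.filter_map]
        rfl
      have hgetD_agree : ∀ i ∈ (PySem.List.sorted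
            ((pvArgIndexes args ecm).keys.filter (fun j => !(j == im))) (fun x => x) false).reverse,
          (pvArgIndexes args ecm).getD i "" = (pvArgIndexes pre ecm).getD i "" := by
        intro i hi
        rw [List.mem_reverse] at hi
        have hi' : i ∈ (pvArgIndexes args ecm).keys.filter (fun j => !(j == im)) :=
          (PySem.List.mem_sorted _ _ _ _).1 hi
        have hineq : i ≠ im := by
          have := (List.mem_filter.1 hi').2
          simpa using this
        have hikeys : i ∈ (pvArgIndexes args ecm).keys := (List.mem_filter.1 hi').1
        rw [pvArgIndexes_keys] at hikeys
        obtain ⟨k, hkfl, hkig⟩ := List.mem_map.1 hikeys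
        have hitem : (i, k) ∈ (pvArgIndexes args ecm).items := by
          rw [pvArgIndexes_items]; exact List.mem_map.2 ⟨k, hkfl, by rw [hkig]⟩
        have hitemp : (i, k) ∈ (pvArgIndexes pre ecm).items := by
          rw [hitems_pre]; exact List.mem_filter.2 ⟨hitem, by simpa using hineq⟩
        rw [PySem.Dict.getD_of_mem_items _ hitem hknd "",
            PySem.Dict.getD_of_mem_items _ hitemp hknd_pre ""]
      have hsplitterkm : pvIsSplitter ecm km = true :=
        (pv_splitter_iff ecm km).2 (List.mem_filter.1 hkmfl).1
      have hkmnotused : km ∉ (pre.foldl (pvStep ecm) pvInit).used := by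
        rw [pv_used_foldl]
        rintro (h | ⟨_, h⟩)
        · simp [pvInit, PySem.Set.empty] at h
        · exact hnotpre h
      have hcontkm : PySem.Set.contains (pre.foldl (pvStep ecm) pvInit).used km = false := by
        cases hx : PySem.Set.contains (pre.foldl (pvStep ecm) pvInit).used km
        · rfl
        · exact absurd ((PySem.Set.contains_iff _ _).1 hx) hkmnotused
      have hswitch : pvStep ecm (pre.foldl (pvStep ecm) pvInit) km
          = { pre.foldl (pvStep ecm) pvInit with
              used := PySem.Set.add (pre.foldl (pvStep ecm) pvInit).used km,
              cur := pvCurOf km } := by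
        rw [pvStep, hsplitterkm, hcontkm]; rfl
      have hsufdata : ∀ a ∈ suf, pvIsSplitter ecm a = true →
          a ∈ (PvSt.mk (pre.foldl (pvStep ecm) pvInit).main
                (pre.foldl (pvStep ecm) pvInit).cmake
                (pre.foldl (pvStep ecm) pvInit).make
                (pre.foldl (pvStep ecm) pvInit).catkin
                (pvCurOf km)
                (PySem.Set.add (pre.foldl (pvStep ecm) pvInit).used km)).used := by
        intro a ha hs
        simp only [PySem.Set.mem_add]
        by_cases hak : a = km
        · exact Or.inr hak
        · left
          rw [pv_used_foldl]
          right
          refine ⟨hs, ?_⟩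
          have hamem : a ∈ args := by
            rw [hsplit]; exact List.mem_append.2 (Or.inr (List.mem_cons_of_mem _ ha))
          have hasome : (PySem.List.index? args a).isSome = true := by
            rw [PySem.List.index?_isSome_iff]; exact hamem
          have hale : pvIG args a ≤ im := hmax' a hasome ((pv_splitter_iff ecm a).1 hs)
          have hane : pvIG args a ≠ im := by
            intro h
            exact hak (pvIG_inj args a km hasome hkmsome (by rw [h, hkmig]))
          have halt : pvIG args a < im := lt_of_le_of_ne hale hane
          obtain ⟨j, hj⟩ := Option.isSome_iff_exists.1 hasome
          have hjim : j < im := by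
            rw [pvIG, hj] at halt; simpa using halt
          obtain ⟨hjlen, hja, _⟩ := PySem.List.getElem_of_index?_eq_some hj
          have hjlt : j < (args.take im).length := by
            rw [List.length_take]; omega
          have hget : (args.take im)[j]'hjlt = a := by
            rw [List.getElem_take]; exact hja
          rw [← hpre_take]
          exact hget ▸ List.getElem_mem hjlt
      -- A side: peel the maximal index
      rw [horder]
      simp only [List.foldl_cons]
      rw [pv_afold_congr (pvArgIndexes args ecm) (pvArgIndexes pre ecm) _ hgetD_agree]
      rw [← hkeys_pre]
      have hcast : ((im : Int) + 1) = (((im + 1 : Nat)) : Int) := by push_cast; ring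
      have hslice0 : PySem.List.slice args (some 0) (some (im : Int)) = pre := by
        rw [PySem.List.slice_zero_start, PySem.List.slice_to_natCast, hpre_take]
      have hslice1 : PySem.List.slice args (some ((im : Int) + 1)) none = suf := by
        rw [hcast, PySem.List.slice_from_natCast, hdrop]
      -- B side: split the fold
      have hbsplit : args.foldl (pvStep ecm) pvInit
          = suf.foldl (pvStep ecm)
              (PvSt.mk (pre.foldl (pvStep ecm) pvInit).main
                (pre.foldl (pvStep ecm) pvInit).cmake
                (pre.foldl (pvStep ecm) pvInit).make
                (pre.foldl (pvStep ecm) pvInit).catkin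
                (pvCurOf km)
                (PySem.Set.add (pre.foldl (pvStep ecm) pvInit).used km)) := by
        conv_lhs => rw [hsplit]
        rw [List.foldl_append, List.foldl_cons, hswitch]
      have hpn : pre.length ≤ n := by omega
      obtain ⟨hc3, hcurne, hbempty⟩ := pv_bucket_keeps ecm km hsplitterkm pre pvInit hnotpre
        (by simp [pvInit]) (by
          have := pvCurOf_mem km
          simp only [pvInit]
          omega) (by
          rcases pvCurOf_mem km with h | h | h <;> rw [h] <;> rfl)
      rcases pv_splitter_cases ecm km hsplitterkm with rfl | rfl | rfl
      · -- km = "--cmake-args"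
        have hstep1 : pvAStep (pvArgIndexes args ecm) (args, ([], [], [])) im
            = (pre, suf, [], []) := by
          simp only [pvAStep, hgetD, hkmidx, hslice0, hslice1]
          rfl
        rw [hstep1]
        have hshift := pv_afold_shift (pvArgIndexes pre ecm) suf [] []
          ((PySem.List.sorted (pvArgIndexes pre ecm).keys (fun x => x) false).reverse)
          pre [] [] []
        simp only [List.append_nil, List.nil_append] at hshift
        rw [hshift, ih pre hpn]
        have hbk : (pre.foldl (pvStep ecm) pvInit).cmake = [] := hbempty
        rw [hbsplit, pv_foldl_data _ _ _ hsufdata, pv_foldl_pvAppend_cmake _ _ rfl]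
        simp [hbk]
      · -- km = "--make-args"
        have hstep1 : pvAStep (pvArgIndexes args ecm) (args, ([], [], [])) im
            = (pre, [], suf, []) := by
          simp only [pvAStep, hgetD, hkmidx, hslice0, hslice1]
          rfl
        rw [hstep1]
        have hshift := pv_afold_shift (pvArgIndexes pre ecm) [] suf []
          ((PySem.List.sorted (pvArgIndexes pre ecm).keys (fun x => x) false).reverse)
          pre [] [] []
        simp only [List.append_nil, List.nil_append] at hshift
        rw [hshift, ih pre hpn]
        have hbk : (pre.foldl (pvStep ecm) pvInit).make = [] := hbempty
        rw [hbsplit, pv_foldl_data _ _ _ hsufdata, pv_foldl_pvAppend_make _ _ rfl]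
        simp [hbk]
      · -- km = "--catkin-make-args"
        have hecm : ecm = true := by
          simpa [pvIsSplitter] using hsplitterkm
        subst hecm
        have hstep1 : pvAStep (pvArgIndexes args true) (args, ([], [], [])) im
            = (pre, [], [], suf) := by
          simp only [pvAStep, hgetD, hkmidx, hslice0, hslice1]
          rfl
        rw [hstep1]
        have hshift := pv_afold_shift (pvArgIndexes pre true) [] [] suf
          ((PySem.List.sorted (pvArgIndexes pre true).keys (fun x => x) false).reverse)
          pre [] [] []
        simp only [List.append_nil, List.nil_append] at hshift
        rw [hshift, ih pre hpn]
        have hbk : (pre.foldl (pvStep true) pvInit).catkin = [] := hbempty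
        rw [hbsplit, pv_foldl_data _ _ _ hsufdata, pv_foldl_pvAppend_catkin _ _ rfl]
        simp [hbk]

-- ===== VERDICT (by name: the statement is the Claim_ definition above) =====
theorem extract_cmake_and_make_arguments_py_spec : Claim_equal_extract_cmake_and_make_arguments_py := by
  intro args ecm _
  unfold Spec_extract_cmake_and_make_arguments_py
  simp only [extract_cmake_and_make_arguments_py, extract_cmake_and_make_arguments_py_alt]
  rw [pv_core ecm args.length args (le_refl _)]
  have hck : pvIsCMakeArg = fun a => PySem.Str.startswith a "-D" || PySem.Str.startswith a "-G" := rfl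
  rw [hck, pv_filter_not_mem_filter]
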